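-- pv_equiv track=rewrite | github.com/adampolak/first-fit | runs/results_numcolors/gen_210/original.py | _apply_round
-- ===== SOURCE A (Python) =====
-- def _span_delta(T):
--   lo = min(l for l, _ in T)
--   hi = max(r for _, r in T)
--   delta = hi - lo
--   if delta <= 0:
--     delta = 1
--   return lo, hi, delta
--
-- def _append_connectors(S, starts, delta):
--   s0, s1, s2, s3 = starts
--   S.append(((s0 - 1) * delta, (s1 - 1) * delta))  # left cap
--   S.append(((s2 + 2) * delta, (s3 + 2) * delta))  # right cap
--   S.append(((s0 + 2) * delta, (s2 - 1) * delta))  # cross 1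
--   S.append(((s1 + 2) * delta, (s3 - 1) * delta))  # cross 2
--
-- def _apply_round(current_T, starts, do_interleave=False, reverse_order=False):
--   lo, hi, delta = _span_delta(current_T)
--
--   # Build translated blocks from current_T
--   blocks = []
--   for s in starts:
--     base = s * delta - lo
--     block = [(l + base, r + base) for (l, r) in current_T]
--     blocks.append(block)
--
--   # Assemble S with optional interleaving and reverse order to mix colors
--   S = []
--   if do_interleave:
--     maxlen = max(len(b) for b in blocks)
--     order = list(range(4))
--     if reverse_order:
--       order.reverse()
--     for i in range(maxlen):
--       for idx in order:
--         blk = blocks[idx]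
--         if i < len(blk):
--           S.append(blk[i])
--   else:
--     if reverse_order:
--       blocks = list(reversed(blocks))
--     for blk in blocks:
--       S.extend(blk)
--
--   # Classic connectors
--   _append_connectors(S, starts, delta)
--   return S
-- ===== SOURCE B (Python) =====
-- def _apply_round(current_T, starts, do_interleave=False, reverse_order=False):
--   # Single flat loop: output position k determines (element i, start j) by divmod
--   # arithmetic; no blocks list, no round-robin, no extend/reverse of block lists.
--   lo = min(l for l, _ in current_T)
--   hi = max(r for _, r in current_T)
--   delta = max(hi - lo, 1)
--   ordered = starts[::-1] if reverse_order else list(starts)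
--   n = len(current_T)
--   S = []
--   for k in range(4 * n):
--     i, j = divmod(k, 4) if do_interleave else (k % n, k // n)
--     l, r = current_T[i]
--     base = ordered[j] * delta - lo
--     S.append((l + base, r + base))
--   s0, s1, s2, s3 = starts
--   S.append(((s0 - 1) * delta, (s1 - 1) * delta))
--   S.append(((s2 + 2) * delta, (s3 + 2) * delta))
--   S.append(((s0 + 2) * delta, (s2 - 1) * delta))
--   S.append(((s1 + 2) * delta, (s3 - 1) * delta))
--   return S
-- ===== Notes on version B (the rewrite author's own statement) =====
-- stated objective: alternative
-- what changed: B never builds per-start blocks: one flat loop over k in range(4*n) computes the (element, start) pair of each output position by divmod index arithmetic (divmod(k,4) for interleave, (k%n, k//n) otherwise), replacing A's blocks list, manual bounds-checked round-robin and extend/reversed passes.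
import Mathlib
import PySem

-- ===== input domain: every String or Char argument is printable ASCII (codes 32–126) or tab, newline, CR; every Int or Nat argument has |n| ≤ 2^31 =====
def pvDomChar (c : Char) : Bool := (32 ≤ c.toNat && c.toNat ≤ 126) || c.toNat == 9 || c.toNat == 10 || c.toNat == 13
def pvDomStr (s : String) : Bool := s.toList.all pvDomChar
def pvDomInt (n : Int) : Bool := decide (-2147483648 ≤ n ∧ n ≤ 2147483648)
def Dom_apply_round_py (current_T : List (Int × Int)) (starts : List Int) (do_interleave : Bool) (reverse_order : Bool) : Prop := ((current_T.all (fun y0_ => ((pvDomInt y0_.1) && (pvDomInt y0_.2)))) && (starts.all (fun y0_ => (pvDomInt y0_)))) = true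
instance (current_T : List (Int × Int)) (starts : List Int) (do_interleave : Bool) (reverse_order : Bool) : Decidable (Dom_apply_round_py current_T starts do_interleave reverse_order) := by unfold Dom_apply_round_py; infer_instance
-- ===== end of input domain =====

-- B drops A's per-start blocks list and round-robin entirely: a single flat loop computes the
-- (element, start) pair of each output position by divmod index arithmetic (objective: alternative).

-- ===== PORT A =====
def apply_round_py (current_T : List (Int × Int)) (starts : List Int) (do_interleave : Bool) (reverse_order : Bool) : List (Int × Int) :=
  -- lo, hi, delta = _span_delta(current_T)  (min/max raise on empty current_T: excluded by Pre_)
  let lo := (PySem.List.min? (current_T.map Prod.fst) (fun x => x)).getD 0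
  let hi := (PySem.List.max? (current_T.map Prod.snd) (fun x => x)).getD 0
  let delta0 := hi - lo
  let delta := if delta0 ≤ 0 then 1 else delta0
  -- blocks loop
  let blocks := starts.foldl (fun bs s =>
    let base := s * delta - lo
    bs ++ [current_T.map (fun p => (p.1 + base, p.2 + base))]) []
  let S :=
    if do_interleave then
      let maxlen := (PySem.List.max? (blocks.map (fun b => (b.length : Int))) (fun x => x)).getD 0
      let order := if reverse_order then (PySem.List.pyRange 0 4 1).reverse else PySem.List.pyRange 0 4 1
      (PySem.List.pyRange 0 maxlen 1).foldl (fun S i =>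
        order.foldl (fun S idx =>
          let blk := PySem.List.pyGetD blocks idx []   -- blocks[idx]; in range under Pre_
          if i < (blk.length : Int) then S ++ [PySem.List.pyGetD blk i (0, 0)] else S) S) []
    else
      let blocks' := if reverse_order then blocks.reverse else blocks
      blocks'.foldl (fun S blk => S ++ blk) []
  -- _append_connectors: s0, s1, s2, s3 = starts  (raises unless len(starts) == 4: excluded by Pre_)
  let s0 := PySem.List.pyGetD starts 0 0
  let s1 := PySem.List.pyGetD starts 1 0
  let s2 := PySem.List.pyGetD starts 2 0
  let s3 := PySem.List.pyGetD starts 3 0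
  S ++ [((s0 - 1) * delta, (s1 - 1) * delta), ((s2 + 2) * delta, (s3 + 2) * delta),
        ((s0 + 2) * delta, (s2 - 1) * delta), ((s1 + 2) * delta, (s3 - 1) * delta)]

-- ===== PORT B =====
def apply_round_py_alt (current_T : List (Int × Int)) (starts : List Int) (do_interleave : Bool) (reverse_order : Bool) : List (Int × Int) :=
  let lo := (PySem.List.min? (current_T.map Prod.fst) (fun x => x)).getD 0
  let hi := (PySem.List.max? (current_T.map Prod.snd) (fun x => x)).getD 0
  let delta := max (hi - lo) 1
  let ordered := if reverse_order then starts.reverse else starts   -- starts[::-1]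
  let n : Int := current_T.length
  let S := (PySem.List.pyRange 0 (4 * n) 1).foldl (fun S k =>
    let ij := if do_interleave then (PySem.Int.floordiv k 4, PySem.Int.mod k 4)
              else (PySem.Int.mod k n, PySem.Int.floordiv k n)
    let p := PySem.List.pyGetD current_T ij.1 (0, 0)   -- current_T[i]; in range under Pre_
    let base := (PySem.List.pyGetD ordered ij.2 0) * delta - lo
    S ++ [(p.1 + base, p.2 + base)]) []
  -- s0, s1, s2, s3 = starts  (len(starts) == 4 under Pre_)
  let s0 := PySem.List.pyGetD starts 0 0
  let s1 := PySem.List.pyGetD starts 1 0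
  let s2 := PySem.List.pyGetD starts 2 0
  let s3 := PySem.List.pyGetD starts 3 0
  S ++ [((s0 - 1) * delta, (s1 - 1) * delta), ((s2 + 2) * delta, (s3 + 2) * delta),
        ((s0 + 2) * delta, (s2 - 1) * delta), ((s1 + 2) * delta, (s3 - 1) * delta)]

-- ===== PRECONDITION & SPEC =====
-- Pre_ excludes exactly the inputs where A raises: min()/max() on empty current_T (ValueError),
-- and the 4-way unpack of starts in _append_connectors (and blocks[idx] with idx in range(4)),
-- which raise unless len(starts) == 4.
def Pre_apply_round_py (current_T : List (Int × Int)) (starts : List Int) (do_interleave : Bool) (reverse_order : Bool) : Prop :=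
  current_T ≠ [] ∧ starts.length = 4
instance (current_T : List (Int × Int)) (starts : List Int) (do_interleave : Bool) (reverse_order : Bool) : Decidable (Pre_apply_round_py current_T starts do_interleave reverse_order) := by unfold Pre_apply_round_py; infer_instance
def pvWitness_apply_round_py : (List (Int × Int)) × List Int × Bool × Bool := ([(0, 2), (3, 5)], [0, 1, 2, 3], true, false)

def Spec_apply_round_py (current_T : List (Int × Int)) (starts : List Int) (do_interleave : Bool) (reverse_order : Bool) (out : List (Int × Int)) : Prop := out = apply_round_py_alt current_T starts do_interleave reverse_order
instance (current_T : List (Int × Int)) (starts : List Int) (do_interleave : Bool) (reverse_order : Bool) (out : List (Int × Int)) : Decidable (Spec_apply_round_py current_T starts do_interleave reverse_order out) := by unfold Spec_apply_round_py; infer_instance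

-- ===== CLAIM (what is proved, stated in full; the proofs are below) =====
def Claim_equal_apply_round_py : Prop := ∀ (current_T : List (Int × Int)) (starts : List Int) (do_interleave : Bool) (reverse_order : Bool), Dom_apply_round_py current_T starts do_interleave reverse_order → Pre_apply_round_py current_T starts do_interleave reverse_order → Spec_apply_round_py current_T starts do_interleave reverse_order (apply_round_py current_T starts do_interleave reverse_order)

-- ===== LEMMAS AND PROOFS =====

-- reading index i of a list through getD, for i over range(len), is the list itself (flatMap form)
theorem flatMap_range_getD {α β : Type} (xs : List α) (d : α) (g : α → List β) :
    (List.range xs.length).flatMap (fun i => g (xs.getD i d)) = xs.flatMap g := by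
  induction xs with
  | nil => simp
  | cons p t ih =>
    simp only [List.length_cons, List.range_succ_eq_map, List.flatMap_cons, List.flatMap_map,
      List.getD_cons_zero, List.getD_cons_succ]
    rw [ih]

-- reading index i through getD, for i over range(len), is the list itself (map form)
theorem map_range_getD {α β : Type} (xs : List α) (d : α) (f : α → β) :
    (List.range xs.length).map (fun i => f (xs.getD i d)) = xs.map f := by
  induction xs with
  | nil => simp
  | cons p t ih =>
    simp only [List.length_cons, List.range_succ_eq_map, List.map_cons, List.map_map,
      List.getD_cons_zero]
    simp only [Function.comp_def, List.getD_cons_succ]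
    rw [ih]

-- the divmod decomposition of a flat index range
theorem range_mul_flat {β : Type} (m n : Nat) (F : Nat → Nat → β) :
    (List.range (m * n)).map (fun k => F (k / n) (k % n))
    = (List.range m).flatMap (fun a => (List.range n).map (F a)) := by
  induction m with
  | zero => simp
  | succ m ih =>
    rw [Nat.succ_mul, List.range_add, List.map_append, ih, List.range_succ, List.flatMap_append]
    congr 1
    · simp only [List.flatMap_cons, List.flatMap_nil, List.append_nil, List.map_map]
      refine List.map_congr_left fun b hb => ?_
      have hbn : b < n := List.mem_range.mp hb
      have hn : 0 < n := by omega
      have e1 : (m * n + b) / n = m := by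
        rw [Nat.mul_comm, Nat.mul_add_div hn, Nat.div_eq_of_lt hbn, Nat.add_zero]
      have e2 : (m * n + b) % n = b := by
        rw [Nat.mul_comm, Nat.mul_add_mod, Nat.mod_eq_of_lt hbn]
      simp [e1, e2]

-- A's interleave round-robin over order = [0,1,2,3] equals element-major flattening
theorem flatMap_range_four {α β : Type} (xs : List α) (f1 f2 f3 f4 : α → β) (d : β) :
    (List.range xs.length).flatMap (fun k =>
      [(xs.map f1).getD k d, (xs.map f2).getD k d, (xs.map f3).getD k d, (xs.map f4).getD k d])
    = xs.flatMap (fun p => [f1 p, f2 p, f3 p, f4 p]) := by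
  induction xs with
  | nil => simp
  | cons p t ih =>
    simp only [List.length_cons, List.range_succ_eq_map, List.flatMap_cons, List.map_cons,
      List.getD_cons_zero, List.flatMap_map]
    simp only [Nat.succ_eq_add_one, List.getD_cons_succ]
    rw [ih]

theorem interleave_core (cT : List (Int × Int)) (f1 f2 f3 f4 : (Int × Int) → (Int × Int)) :
    (PySem.List.pyRange 0 (cT.length : Int) 1).foldl
      (fun S i => ([(0:Int),1,2,3]).foldl
        (fun S idx =>
          if i < ((PySem.List.pyGetD [cT.map f1, cT.map f2, cT.map f3, cT.map f4] idx []).length : Int)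
          then S ++ [PySem.List.pyGetD (PySem.List.pyGetD [cT.map f1, cT.map f2, cT.map f3, cT.map f4] idx []) i (0,0)]
          else S) S) []
    = cT.flatMap (fun p => [f1 p, f2 p, f3 p, f4 p]) := by
  have step : ∀ (acc : List (Int × Int)), ∀ i ∈ PySem.List.pyRange 0 (cT.length : Int) 1,
      ([(0:Int),1,2,3]).foldl
        (fun S idx =>
          if i < ((PySem.List.pyGetD [cT.map f1, cT.map f2, cT.map f3, cT.map f4] idx []).length : Int)
          then S ++ [PySem.List.pyGetD (PySem.List.pyGetD [cT.map f1, cT.map f2, cT.map f3, cT.map f4] idx []) i (0,0)]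
          else S) acc
      = acc ++ [PySem.List.pyGetD (cT.map f1) i (0,0), PySem.List.pyGetD (cT.map f2) i (0,0),
                PySem.List.pyGetD (cT.map f3) i (0,0), PySem.List.pyGetD (cT.map f4) i (0,0)] := by
    intro acc i hi
    have h := PySem.List.mem_pyRange_one.mp hi
    simp [List.foldl_cons, List.foldl_nil, PySem.List.pyGetD, PySem.List.pyGet?, PySem.List.pyIdx?, h.2]
  rw [PySem.List.foldl_congr_mem _ _ _ _ step, PySem.List.foldl_append_eq_flatMap,
    PySem.List.pyRange_one]
  simp only [List.flatMap_map, zero_add, Int.sub_zero, Int.toNat_natCast, PySem.List.pyGetD_natCast]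
  exact flatMap_range_four cT f1 f2 f3 f4 (0,0)

-- the same with reversed order = [3,2,1,0]
theorem interleave_core_rev (cT : List (Int × Int)) (f1 f2 f3 f4 : (Int × Int) → (Int × Int)) :
    (PySem.List.pyRange 0 (cT.length : Int) 1).foldl
      (fun S i => ([(3:Int),2,1,0]).foldl
        (fun S idx =>
          if i < ((PySem.List.pyGetD [cT.map f1, cT.map f2, cT.map f3, cT.map f4] idx []).length : Int)
          then S ++ [PySem.List.pyGetD (PySem.List.pyGetD [cT.map f1, cT.map f2, cT.map f3, cT.map f4] idx []) i (0,0)]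
          else S) S) []
    = cT.flatMap (fun p => [f4 p, f3 p, f2 p, f1 p]) := by
  have step : ∀ (acc : List (Int × Int)), ∀ i ∈ PySem.List.pyRange 0 (cT.length : Int) 1,
      ([(3:Int),2,1,0]).foldl
        (fun S idx =>
          if i < ((PySem.List.pyGetD [cT.map f1, cT.map f2, cT.map f3, cT.map f4] idx []).length : Int)
          then S ++ [PySem.List.pyGetD (PySem.List.pyGetD [cT.map f1, cT.map f2, cT.map f3, cT.map f4] idx []) i (0,0)]
          else S) acc
      = acc ++ [PySem.List.pyGetD (cT.map f4) i (0,0), PySem.List.pyGetD (cT.map f3) i (0,0),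
                PySem.List.pyGetD (cT.map f2) i (0,0), PySem.List.pyGetD (cT.map f1) i (0,0)] := by
    intro acc i hi
    have h := PySem.List.mem_pyRange_one.mp hi
    simp [List.foldl_cons, List.foldl_nil, PySem.List.pyGetD, PySem.List.pyGet?, PySem.List.pyIdx?, h.2]
  rw [PySem.List.foldl_congr_mem _ _ _ _ step, PySem.List.foldl_append_eq_flatMap,
    PySem.List.pyRange_one]
  simp only [List.flatMap_map, zero_add, Int.sub_zero, Int.toNat_natCast, PySem.List.pyGetD_natCast]
  exact flatMap_range_four cT f4 f3 f2 f1 (0,0)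

-- B's flat divmod loop, interleave shape: i = k // 4, j = k % 4 over range(4*n)
theorem B_inter (cT : List (Int × Int)) (os : List Int) (hos : os.length = 4) (D L : Int) :
    (PySem.List.pyRange 0 (4 * (cT.length : Int)) 1).map (fun k =>
      ((PySem.List.pyGetD cT (PySem.Int.floordiv k 4) (0,0)).1
               + ((PySem.List.pyGetD os (PySem.Int.mod k 4) 0) * D - L),
             (PySem.List.pyGetD cT (PySem.Int.floordiv k 4) (0,0)).2
               + ((PySem.List.pyGetD os (PySem.Int.mod k 4) 0) * D - L)))
    = cT.flatMap (fun p => os.map (fun s => (p.1 + (s * D - L), p.2 + (s * D - L)))) := by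
  rw [PySem.List.pyRange_one]
  have h4 : ((4 * (cT.length : Int)) - 0).toNat = cT.length * 4 := by push_cast; omega
  rw [h4, List.map_map]
  have hfun : ((fun k => (((PySem.List.pyGetD cT (PySem.Int.floordiv k 4) (0,0)).1
               + ((PySem.List.pyGetD os (PySem.Int.mod k 4) 0) * D - L),
             (PySem.List.pyGetD cT (PySem.Int.floordiv k 4) (0,0)).2
               + ((PySem.List.pyGetD os (PySem.Int.mod k 4) 0) * D - L)) : Int × Int))
                ∘ fun k : Nat => (0:Int) + k)
      = (fun k : Nat => (fun a b => (((cT.getD a (0,0)).1 + ((os.getD b 0) * D - L),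
          (cT.getD a (0,0)).2 + ((os.getD b 0) * D - L)) : Int × Int)) (k / 4) (k % 4)) := by
    funext k
    simp only [Function.comp_apply, zero_add]
    rw [show ((4:Int) = ((4:Nat):Int)) by norm_num,
      PySem.Int.floordiv_natCast, PySem.Int.mod_natCast,
      PySem.List.pyGetD_natCast, PySem.List.pyGetD_natCast]
  rw [hfun, range_mul_flat cT.length 4
    (fun a b => (((cT.getD a (0,0)).1 + ((os.getD b 0) * D - L),
      (cT.getD a (0,0)).2 + ((os.getD b 0) * D - L)) : Int × Int))]
  rw [← flatMap_range_getD cT (0,0)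
    (fun p => os.map (fun s => (p.1 + (s * D - L), p.2 + (s * D - L))))]
  refine List.flatMap_congr fun a _ => ?_
  rw [show (4 = os.length) from hos.symm]
  exact map_range_getD os 0
    (fun s => (((cT.getD a (0,0)).1 + (s * D - L), (cT.getD a (0,0)).2 + (s * D - L)) : Int × Int))

-- B's flat divmod loop, block shape: i = k % n, j = k // n over range(4*n)
theorem B_block (cT : List (Int × Int)) (os : List Int) (hos : os.length = 4) (D L : Int) :
    (PySem.List.pyRange 0 (4 * (cT.length : Int)) 1).map (fun k =>
      ((PySem.List.pyGetD cT (PySem.Int.mod k (cT.length : Int)) (0,0)).1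
               + ((PySem.List.pyGetD os (PySem.Int.floordiv k (cT.length : Int)) 0) * D - L),
             (PySem.List.pyGetD cT (PySem.Int.mod k (cT.length : Int)) (0,0)).2
               + ((PySem.List.pyGetD os (PySem.Int.floordiv k (cT.length : Int)) 0) * D - L)))
    = os.flatMap (fun s => cT.map (fun p => (p.1 + (s * D - L), p.2 + (s * D - L)))) := by
  rw [PySem.List.pyRange_one]
  have h4 : ((4 * (cT.length : Int)) - 0).toNat = 4 * cT.length := by push_cast; omega
  rw [h4, List.map_map]
  have hfun : ((fun k => (((PySem.List.pyGetD cT (PySem.Int.mod k (cT.length : Int)) (0,0)).1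
               + ((PySem.List.pyGetD os (PySem.Int.floordiv k (cT.length : Int)) 0) * D - L),
             (PySem.List.pyGetD cT (PySem.Int.mod k (cT.length : Int)) (0,0)).2
               + ((PySem.List.pyGetD os (PySem.Int.floordiv k (cT.length : Int)) 0) * D - L)) : Int × Int))
                ∘ fun k : Nat => (0:Int) + k)
      = (fun k : Nat => (fun a b => (((cT.getD b (0,0)).1 + ((os.getD a 0) * D - L),
          (cT.getD b (0,0)).2 + ((os.getD a 0) * D - L)) : Int × Int)) (k / cT.length) (k % cT.length)) := by
    funext k
    simp only [Function.comp_apply, zero_add]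
    rw [PySem.Int.floordiv_natCast, PySem.Int.mod_natCast,
      PySem.List.pyGetD_natCast, PySem.List.pyGetD_natCast]
  rw [hfun, range_mul_flat 4 cT.length
    (fun a b => (((cT.getD b (0,0)).1 + ((os.getD a 0) * D - L),
      (cT.getD b (0,0)).2 + ((os.getD a 0) * D - L)) : Int × Int))]
  rw [show (4 = os.length) from hos.symm,
    ← flatMap_range_getD os 0
      (fun s => cT.map (fun p => (p.1 + (s * D - L), p.2 + (s * D - L))))]
  refine List.flatMap_congr fun a _ => ?_
  exact map_range_getD cT (0,0)
    (fun p => ((p.1 + ((os.getD a 0) * D - L), p.2 + ((os.getD a 0) * D - L)) : Int × Int))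

-- ===== VERDICT (by name: the statement is the Claim_ definition above) =====
theorem apply_round_py_spec : Claim_equal_apply_round_py := by
  intro cT starts di ro _ hpre
  obtain ⟨-, hlen⟩ := hpre
  rcases starts with _ | ⟨a, _ | ⟨b, _ | ⟨c, _ | ⟨d, _ | ⟨e, t⟩⟩⟩⟩⟩ <;> simp at hlen
  have hd : ∀ x : Int, (if x ≤ 0 then (1:Int) else x) = max x 1 := fun x => by omega
  have hord : PySem.List.pyRange 0 4 1 = [(0:Int),1,2,3] := by decide
  have hordr : (PySem.List.pyRange 0 4 1).reverse = [(3:Int),2,1,0] := by decide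
  have hm : ∀ m : Int, List.foldl max m [m, m, m] = m := fun m => by simp
  have hext : ∀ (L : List (List (Int × Int))) (acc : List (Int × Int)),
      L.foldl (fun S blk => S ++ blk) acc = acc ++ L.flatten := by
    intro L
    induction L with
    | nil => simp
    | cons h t ih => intro acc; simp only [List.foldl_cons, ih, List.flatten_cons, List.append_assoc]
  unfold Spec_apply_round_py
  cases di <;> cases ro <;>
    simp only [apply_round_py, apply_round_py_alt, hd, hord, hordr, hm,
      Bool.false_eq_true, eq_self_iff_true, if_true, if_false,
      PySem.List.foldl_append_singleton_eq_map,
      PySem.List.max?_id_cons, Option.getD_some,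
      List.map_cons, List.map_nil, List.length_map,
      List.reverse_cons, List.reverse_nil, List.nil_append, List.append_nil,
      List.cons_append,
      List.flatMap_cons, List.flatMap_nil, List.append_assoc,
      hext, List.flatten_cons, List.flatten_nil]
  · rw [B_block cT [a,b,c,d] (by simp)]
    simp [List.flatMap_cons]
  · rw [B_block cT [d,c,b,a] (by simp)]
    simp [List.flatMap_cons]
  · rw [interleave_core, B_inter cT [a,b,c,d] (by simp)]
    simp [List.map_cons]
  · rw [interleave_core_rev, B_inter cT [d,c,b,a] (by simp)]
    simp [List.map_cons]
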